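-- pv_equiv track=rewrite | github.com/devDivyank/BigData | HW7/Q5 - LatticeAllLevels.py | existsStatement
-- ===== SOURCE A (Python) =====
-- from itertools import combinations
--
-- def actorColumnsForLevel(currentLevel):
--     """
--         returns the actor columns in a level as string
--
--         :param currentLevel: level of the lattice
--     """
--     columns = ""
--     for i in range(1, currentLevel + 1):
--         columns += ', actor' + str(i)
--     return columns[2:]
--
-- def existsStatement(currentLevel):
--     """
--         returns the EXISTS part of the query for the level
--
--         :param currentLevel: level of the lattice
--     """
--     lastLevelTable = "l" + str(currentLevel-1)
--     levelView = "v" + str(currentLevel)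
--     fullStatement = ""
--     eachExistsStatement = []
--     for combination in actorAllCombinations(currentLevel):
--         temp = ""
--         i = 0
--         for actor in combination.split(", "):
--             line = lastLevelTable + "." + actorColumnsForLevel(currentLevel-1).split(', ')[i] + " = " \
--                                                             + levelView + "." + actor + " AND "
--             temp += line
--             i += 1
--         eachExistsStatement.append(temp[:-5])
--     for statement in eachExistsStatement:
--         fullStatement += "EXISTS (SELECT * FROM " + lastLevelTable + " WHERE " + statement + ") AND "
--     return fullStatement[:-6]
--
-- def actorAllCombinations(currentLevel):
--     """
--         returns the combinations of actor columns for WHERE part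
--         of the EXISTS clauses
--
--         :param currentLevel: level of the lattice
--     """
--     allActorColumns = actorColumnsForLevel(currentLevel).split(', ')
--     allCombs = []
--     for i in range(0, currentLevel + 1):
--             for element in combinations(allActorColumns, i):
--                 if len(element) == currentLevel - 1:
--                     allCombs.append(', '.join(element))
--     return allCombs
-- ===== SOURCE B (Python) =====
-- def existsStatement(currentLevel):
--     """
--         returns the EXISTS part of the query for the level
--         (direct construction: each WHERE clause omits exactly one of the
--         currentLevel actor columns, in descending order of the omitted index)
--     """
--     prev = "l" + str(currentLevel - 1)
--     view = "v" + str(currentLevel)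
--     actors = ["actor" + str(i) for i in range(1, currentLevel + 1)]
--     clauses = []
--     for omit in range(currentLevel - 1, -1, -1):
--         chosen = actors[:omit] + actors[omit + 1:]
--         cond = " AND ".join(prev + "." + x + " = " + view + "." + a
--                             for x, a in zip(actors, chosen))
--         clauses.append("EXISTS (SELECT * FROM " + prev + " WHERE " + cond)
--     return ") AND ".join(clauses)
-- ===== Notes on version B (the rewrite author's own statement) =====
-- stated objective: faster
-- what changed: Instead of enumerating every subset of the actor columns (exponentially many) and filtering for those of size currentLevel-1, then joining each combination into a string and re-splitting it, B directly emits one clause per omitted column (omitted index descending) and pairs previous-level columns with the chosen ones by zip; intended as asymptotically faster (O(n^2) vs O(2^n * n)) and observed so in a timing run only as 'A timed out at n=16 where B returned' - no clean ratio could be measured at a size where both finish.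
-- intended difference: At currentLevel = 1 A returns 'EXISTS (SELECT * FROM l0 WHERE l0. = v1.' with a spurious empty-named condition caused by splitting the empty previous-level column string into [''], while B returns 'EXISTS (SELECT * FROM l0 WHERE ' with an empty condition list, which is the intended degenerate clause since the previous level has no actor columns. — e.g. on existsStatement(1): A returns "EXISTS (SELECT * FROM l0 WHERE l0. = v1.", B returns "EXISTS (SELECT * FROM l0 WHERE "
import Mathlib
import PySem

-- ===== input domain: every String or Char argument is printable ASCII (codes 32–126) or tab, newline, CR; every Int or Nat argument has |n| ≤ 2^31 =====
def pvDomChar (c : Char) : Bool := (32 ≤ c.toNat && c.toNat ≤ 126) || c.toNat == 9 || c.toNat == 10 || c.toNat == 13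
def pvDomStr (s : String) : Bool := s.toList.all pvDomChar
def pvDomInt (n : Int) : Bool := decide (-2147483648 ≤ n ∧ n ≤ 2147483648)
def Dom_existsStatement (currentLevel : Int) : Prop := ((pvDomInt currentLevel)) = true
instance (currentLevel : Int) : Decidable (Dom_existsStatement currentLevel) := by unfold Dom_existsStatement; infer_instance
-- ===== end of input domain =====

-- B replaces A's enumeration of all 2^n column subsets (filtered for size n-1, joined and
-- re-split) by a direct per-omitted-column construction; return values agree everywhere
-- except at currentLevel = 1 (stated in D_ below).

-- ===== PORT A =====

-- s.split(sep) for a nonempty sep (exact there; Python raises only for sep = "", never reached)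
def pySplit (s sep : String) : List String :=
  (PySem.Chars.splitOn s.toList sep.toList).map String.ofList

def actorColumnsForLevel (currentLevel : Int) : String :=
  let columns := (PySem.List.pyRange 1 (currentLevel + 1) 1).foldl
    (fun columns i => columns ++ ", actor" ++ PySem.Int.toStr i) ""
  PySem.Str.slice columns (some 2) none

def actorAllCombinations (currentLevel : Int) : List String :=
  let allActorColumns := pySplit (actorColumnsForLevel currentLevel) ", "
  (PySem.List.pyRange 0 (currentLevel + 1) 1).foldl (fun allCombs i =>
    (PySem.List.combinations allActorColumns i.toNat).foldl (fun allCombs element =>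
      if (element.length : Int) = currentLevel - 1 then
        allCombs ++ [PySem.Str.join ", " element]
      else allCombs) allCombs) []

def existsStatement (currentLevel : Int) : String :=
  let lastLevelTable := "l" ++ PySem.Int.toStr (currentLevel - 1)
  let levelView := "v" ++ PySem.Int.toStr currentLevel
  let eachExistsStatement := (actorAllCombinations currentLevel).foldl
    (fun each combination =>
      -- inner loop carries (temp, i); the [i] lookup is always in range in the Python,
      -- so pyGetD's default is never used
      let ti := (pySplit combination ", ").foldl
        (fun (st : String × Int) actor =>
          let line := lastLevelTable ++ "." ++
            PySem.List.pyGetD (pySplit (actorColumnsForLevel (currentLevel - 1)) ", ") st.2 ""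
            ++ " = " ++ levelView ++ "." ++ actor ++ " AND "
          (st.1 ++ line, st.2 + 1)) ("", 0)
      each ++ [PySem.Str.slice ti.1 none (some (-5))]) []
  let fullStatement := eachExistsStatement.foldl
    (fun full statement =>
      full ++ "EXISTS (SELECT * FROM " ++ lastLevelTable ++ " WHERE " ++ statement ++ ") AND ") ""
  PySem.Str.slice fullStatement none (some (-6))

-- ===== PORT B =====

def existsStatement_alt (currentLevel : Int) : String :=
  let prev := "l" ++ PySem.Int.toStr (currentLevel - 1)
  let view := "v" ++ PySem.Int.toStr currentLevel
  let actors := (PySem.List.pyRange 1 (currentLevel + 1) 1).map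
    (fun i => "actor" ++ PySem.Int.toStr i)
  let clauses := (PySem.List.pyRange (currentLevel - 1) (-1) (-1)).map
    (fun om =>
      let chosen := PySem.List.slice actors none (some om) ++
                    PySem.List.slice actors (some (om + 1)) none
      let cond := PySem.Str.join " AND "
        ((actors.zip chosen).map (fun xa => prev ++ "." ++ xa.1 ++ " = " ++ view ++ "." ++ xa.2))
      "EXISTS (SELECT * FROM " ++ prev ++ " WHERE " ++ cond)
  PySem.Str.join ") AND " clauses

-- ===== PRECONDITION & SPEC =====

-- At currentLevel = 1 A returns "EXISTS (SELECT * FROM l0 WHERE l0. = v1." with a spurious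
-- empty-named condition caused by splitting the empty previous-level column string into [''],
-- while B returns "EXISTS (SELECT * FROM l0 WHERE " with an empty condition list, which is
-- the intended degenerate clause since the previous level has no actor columns.
def D_existsStatement (currentLevel : Int) : Prop := currentLevel = 1
instance (currentLevel : Int) : Decidable (D_existsStatement currentLevel) := by
  unfold D_existsStatement; infer_instance

def Spec_existsStatement (currentLevel : Int) (out : String) : Prop :=
  ¬ D_existsStatement currentLevel → out = existsStatement_alt currentLevel
instance (currentLevel : Int) (out : String) : Decidable (Spec_existsStatement currentLevel out) := by
  unfold Spec_existsStatement; infer_instance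

def pvDiffWitness_existsStatement : Int := (1)
def pvDiffWitnessOut_existsStatement : String × String :=
  ("EXISTS (SELECT * FROM l0 WHERE l0. = v1.", "EXISTS (SELECT * FROM l0 WHERE ")

-- ===== CLAIM (what is proved, stated in full; the proofs are below) =====
def Claim_unchanged_existsStatement : Prop :=
  ∀ (currentLevel : Int), Dom_existsStatement currentLevel →
    Spec_existsStatement currentLevel (existsStatement currentLevel)
def Claim_changed_existsStatement : Prop :=
  Dom_existsStatement (pvDiffWitness_existsStatement) ∧
  D_existsStatement (pvDiffWitness_existsStatement) ∧
  existsStatement (pvDiffWitness_existsStatement) = pvDiffWitnessOut_existsStatement.1 ∧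
  existsStatement_alt (pvDiffWitness_existsStatement) = pvDiffWitnessOut_existsStatement.2 ∧
  pvDiffWitnessOut_existsStatement.1 ≠ pvDiffWitnessOut_existsStatement.2
def Claim_exact_existsStatement : Prop :=
  ∀ (currentLevel : Int), Dom_existsStatement currentLevel →
    D_existsStatement currentLevel → existsStatement currentLevel ≠ existsStatement_alt currentLevel

-- ===== LEMMAS AND PROOFS =====

def pvSplitC : List Char → List (List Char)
  | [] => [[]]
  | c :: rest =>
    if [',', ' '].isPrefixOf (c :: rest) then [] :: pvSplitC rest.tail
    else (pvSplitC rest).modifyHead (c :: ·)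
termination_by l => l.length
decreasing_by
  · simp only [List.length_cons, List.length_tail]; omega
  · simp

theorem pvModifyHead_self {α : Type} (l : List α) : List.modifyHead (fun x => x) l = l := by
  cases l <;> simp

theorem pvGo_spec : ∀ (fuel : Nat) (l cur : List Char) (acc : List (List Char)),
    l.length < fuel →
    PySem.Chars.splitOn.go [',', ' '] fuel l cur acc
      = acc.reverse ++ (pvSplitC l).modifyHead (cur.reverse ++ ·) := by
  intro fuel
  induction fuel with
  | zero => intro l cur acc h; omega
  | succ f ih =>
    intro l cur acc h
    match l with
    | [] =>
      rw [PySem.Chars.splitOn.go.eq_def]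
      simp [pvSplitC]
    | c :: rest =>
      rw [PySem.Chars.splitOn.go.eq_def]
      simp only []
      by_cases hp : [',', ' '].isPrefixOf (c :: rest)
      · rw [if_pos hp]
        have hd : List.drop ([',', ' '].length) (c :: rest) = rest.tail := by simp [List.drop_succ_cons, List.drop_one]
        rw [ih _ _ _ (by
          simp only [List.length_cons] at h
          simp only [hd, List.length_tail]; omega)]
        rw [pvSplitC, if_pos hp, hd]
        simp only [List.reverse_cons, List.reverse_nil, List.nil_append, List.append_assoc,
          List.modifyHead_cons, pvModifyHead_self]
        simp
      · rw [if_neg hp]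
        rw [ih _ _ _ (by simp only [List.length_cons] at h; omega)]
        rw [pvSplitC, if_neg hp]
        rw [List.modifyHead_modifyHead]
        simp only [List.reverse_cons, List.append_assoc, Function.comp_def,
          List.singleton_append]

theorem pvSplitOn_eq (l : List Char) :
    PySem.Chars.splitOn l [',', ' '] = pvSplitC l := by
  show PySem.Chars.splitOn.go _ _ _ _ _ = _
  rw [pvGo_spec (l.length + 1) l [] [] (by omega)]
  simp only [List.reverse_nil, List.nil_append, pvModifyHead_self]

theorem pvSplitC_sep (l' : List Char) : pvSplitC (',' :: ' ' :: l') = [] :: pvSplitC l' := by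
  rw [pvSplitC]
  rw [if_pos (by simp [List.isPrefixOf])]
  rfl

theorem pvSplitC_append (p : List Char) (l' : List Char) (hp : ',' ∉ p) :
    pvSplitC (p ++ l') = (pvSplitC l').modifyHead (p ++ ·) := by
  induction p with
  | nil => simp [pvModifyHead_self]
  | cons c p' ih =>
    have hc : c ≠ ',' := by intro h; exact hp (by simp [h])
    rw [List.cons_append, pvSplitC, if_neg (by
      simp [List.isPrefixOf]; exact fun h => absurd h.symm hc)]
    rw [ih (fun h => hp (by simp [h]))]
    rw [List.modifyHead_modifyHead]
    simp only [Function.comp_def, List.cons_append]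

theorem pvSplitC_join : ∀ (parts : List (List Char)), (∀ p ∈ parts, ',' ∉ p) →
    parts ≠ [] → pvSplitC (PySem.Chars.join [',', ' '] parts) = parts := by
  intro parts
  induction parts with
  | nil => intro _ h; exact absurd rfl h
  | cons p rest ih =>
    intro hfree _
    match rest with
    | [] =>
      rw [PySem.Chars.join_singleton]
      have := pvSplitC_append p [] (hfree p (by simp))
      simpa [pvSplitC] using this
    | q :: rest' =>
      rw [PySem.Chars.join_cons_cons]
      rw [List.append_assoc, pvSplitC_append p _ (hfree p (by simp))]
      have : ([',', ' '] : List Char) ++ PySem.Chars.join [',', ' '] (q :: rest')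
          = ',' :: ' ' :: PySem.Chars.join [',', ' '] (q :: rest') := rfl
      rw [this, pvSplitC_sep]
      rw [ih (fun x hx => hfree x (by simp [hx])) (by simp)]
      simp


def pvName (i : Nat) : String := "actor" ++ PySem.Int.toStr ((i : Int) + 1)
def pvNames (k : Nat) : List String := (List.range k).map pvName
def pvCat : List String → String
  | [] => ""
  | s :: t => s ++ pvCat t

theorem pvSep_toList : (", " : String).toList = [',', ' '] := by decide

theorem pvName_comma_free (i : Nat) : ',' ∉ (pvName i).toList := by
  unfold pvName
  rw [String.toList_append]
  intro h
  rcases List.mem_append.1 h with h | h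
  · revert h; decide
  · rw [PySem.Int.toList_toStr, PySem.Int.toChars, if_neg (by omega)] at h
    have hd := Nat.isDigit_of_mem_toDigits (b := 10) (by norm_num) (le_refl 10) h
    revert hd; decide

theorem pySplit_join (parts : List String) (h : ∀ s ∈ parts, ',' ∉ s.toList)
    (hne : parts ≠ []) : pySplit (PySem.Str.join ", " parts) ", " = parts := by
  unfold pySplit
  rw [PySem.Str.toList_join, pvSep_toList, pvSplitOn_eq,
    pvSplitC_join _ (by
      intro p hp
      rcases List.mem_map.1 hp with ⟨s, hs, rfl⟩
      exact h s hs) (by simpa using hne)]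
  rw [List.map_map]
  simp [Function.comp_def, String.ofList_toList]

theorem pvJoin_singleton (sep x : String) : PySem.Str.join sep [x] = x := by
  rw [← String.toList_inj, PySem.Str.toList_join]
  simp [PySem.Chars.join_singleton]

theorem pvJoin_cons_cons (sep p q : String) (rest : List String) :
    PySem.Str.join sep (p :: q :: rest) = p ++ sep ++ PySem.Str.join sep (q :: rest) := by
  rw [← String.toList_inj, PySem.Str.toList_join]
  simp [PySem.Chars.join_cons_cons, String.toList_append, PySem.Str.toList_join]

theorem pvJoin_snoc (sep : String) : ∀ (l : List String), l ≠ [] → ∀ x,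
    PySem.Str.join sep (l ++ [x]) = PySem.Str.join sep l ++ sep ++ x := by
  intro l
  induction l with
  | nil => intro h; exact absurd rfl h
  | cons p rest ih =>
    intro _ x
    match rest with
    | [] =>
      show PySem.Str.join sep (p :: [x]) = _
      rw [pvJoin_cons_cons, pvJoin_singleton, pvJoin_singleton]
    | q :: rest' =>
      show PySem.Str.join sep (p :: ((q :: rest') ++ [x])) = _
      rw [show p :: ((q :: rest') ++ [x]) = p :: q :: (rest' ++ [x]) from rfl]
      rw [pvJoin_cons_cons]
      rw [show (q :: (rest' ++ [x])) = (q :: rest') ++ [x] from rfl]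
      rw [ih (by simp) x, pvJoin_cons_cons]
      simp [String.append_assoc]

theorem pvCat_map_sep (sep : String) : ∀ (l : List String), l ≠ [] →
    pvCat (l.map (· ++ sep)) = PySem.Str.join sep l ++ sep := by
  intro l
  induction l with
  | nil => intro h; exact absurd rfl h
  | cons p rest ih =>
    intro _
    match rest with
    | [] => simp [pvCat, pvJoin_singleton]
    | q :: rest' =>
      show pvCat ((p ++ sep) :: ((q :: rest').map (· ++ sep))) = _
      rw [pvCat, ih (by simp), pvJoin_cons_cons]
      simp [String.append_assoc]

theorem pvStrip (sep : String) (k : Nat) (hk : 0 < k) (hlen : sep.toList.length = k)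
    (l : List String) (hl : l ≠ []) :
    PySem.Str.slice (pvCat (l.map (· ++ sep))) none (some (-(k : Int))) = PySem.Str.join sep l := by
  rw [pvCat_map_sep sep l hl]
  rw [← String.toList_inj, PySem.Str.toList_slice]
  rw [PySem.Chars.slice_eq_listSlice]
  rw [PySem.List.slice_to_neg_natCast _ k hk]
  rw [String.toList_append, List.length_append, hlen, Nat.add_sub_cancel, List.take_left]


theorem pvRange_one_nil {a b : Int} (h : b ≤ a) : PySem.List.pyRange a b 1 = [] := by
  simp [PySem.List.pyRange, show ¬ (a < b) from by omega]

theorem pvRange_negstep_nil {a b : Int} (h : a ≤ b) : PySem.List.pyRange a b (-1) = [] := by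
  simp [PySem.List.pyRange, show ¬ (b < a) from by omega]

theorem pvRange_one (k : Nat) :
    PySem.List.pyRange 1 ((k : Int) + 1) 1 = (List.range k).map (fun i : Nat => ((i : Int) + 1)) := by
  match k with
  | 0 => simp
  | k + 1 =>
    simp only [PySem.List.pyRange, if_neg (by norm_num : ¬ (1 : Int) = 0),
      if_pos (by norm_num : (0:Int) < 1), if_pos (by push_cast; omega : (1:Int) < (↑(k+1) : Int) + 1)]
    have hc : ((↑(k + 1) + 1 - 1 + 1 - 1 : Int) / 1).toNat = k + 1 := by
      push_cast; omega
    rw [hc]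
    exact List.map_congr_left (fun a _ => by ring)

theorem pvRange_zero' (k : Nat) :
    PySem.List.pyRange 0 ((k : Int) + 1) 1 = (List.range (k + 1)).map (fun i : Nat => (i : Int)) := by
  simp only [PySem.List.pyRange, if_neg (by norm_num : ¬ (1 : Int) = 0),
    if_pos (by norm_num : (0:Int) < 1), if_pos (by positivity : (0:Int) < (k : Int) + 1)]
  have hc : (((k:Int) + 1 - 0 + 1 - 1) / 1).toNat = k + 1 := by omega
  rw [hc]
  exact List.map_congr_left (fun a _ => by ring)

theorem pvRange_neg (m : Nat) :
    PySem.List.pyRange ((m : Int) - 1) (-1) (-1)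
      = (List.range m).map (fun j : Nat => (m : Int) - 1 - j) := by
  match m with
  | 0 => simp
  | m + 1 =>
    simp only [PySem.List.pyRange, if_neg (by norm_num : ¬ (-1 : Int) = 0),
      if_neg (by norm_num : ¬ (0:Int) < -1),
      if_pos (by push_cast; omega : (-1:Int) < (↑(m+1) : Int) - 1)]
    have hc : ((↑(m + 1) - 1 - (-1) + - (-1) - 1 : Int) / -(-1)).toNat = m + 1 := by
      push_cast; omega
    rw [hc]
    exact List.map_congr_left (fun a _ => by ring)

theorem pvLit_comma_actor : (", actor" : String).toList = [',', ' ', 'a', 'c', 't', 'o', 'r'] := by decide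
theorem pvLit_comma : (", " : String).toList = [',', ' '] := by decide
theorem pvLit_actor : ("actor" : String).toList = ['a', 'c', 't', 'o', 'r'] := by decide

theorem pvNames_ne_nil {k : Nat} (hk : 1 ≤ k) : pvNames k ≠ [] := by
  unfold pvNames
  simp [List.map_eq_nil_iff, List.range_eq_nil]
  omega

theorem pvColsFold (k : Nat) (hk : 1 ≤ k) :
    (List.range k).foldl (fun (acc : String) (i : Nat) => acc ++ ", actor" ++ PySem.Int.toStr ((i : Int) + 1)) ""
      = ", " ++ PySem.Str.join ", " (pvNames k) := by
  induction k, hk using Nat.le_induction with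
  | base =>
    show ("" ++ ", actor") ++ PySem.Int.toStr ((0:Nat) + 1 : Int) = _
    rw [show pvNames 1 = [pvName 0] from rfl, pvJoin_singleton]
    rw [← String.toList_inj]
    simp [String.toList_append, pvLit_comma_actor, pvLit_comma, pvLit_actor, pvName]
  | succ k hk ih =>
    rw [List.range_succ, List.foldl_append, ih]
    show ((", " ++ PySem.Str.join ", " (pvNames k)) ++ ", actor") ++ PySem.Int.toStr ((k : Int) + 1) = _
    rw [show pvNames (k+1) = pvNames k ++ [pvName k] from by
      unfold pvNames; rw [List.range_succ, List.map_append]; rfl]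
    rw [pvJoin_snoc _ _ (pvNames_ne_nil hk)]
    rw [← String.toList_inj]
    simp [String.toList_append, pvLit_comma_actor, pvLit_comma, pvLit_actor, pvName]

theorem pvCols (k : Nat) (hk : 1 ≤ k) :
    actorColumnsForLevel (k : Int) = PySem.Str.join ", " (pvNames k) := by
  unfold actorColumnsForLevel
  rw [pvRange_one k, List.foldl_map, pvColsFold k hk]
  rw [← String.toList_inj, PySem.Str.toList_slice, PySem.Chars.slice_eq_listSlice]
  rw [show (2 : Int) = ((2 : Nat) : Int) from rfl, PySem.List.slice_from_natCast]
  rw [String.toList_append]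
  rw [show (2 : Nat) = (", " : String).toList.length from by decide, List.drop_left]

theorem pvComb_cons {α : Type} : ∀ (xs : List α) (x : α),
    PySem.List.combinations (x :: xs) xs.length
      = ((List.range (xs.length + 1)).reverse).map ((x :: xs).eraseIdx) := by
  intro xs
  induction xs with
  | nil => intro x; simp [PySem.List.combinations_zero]
  | cons y t ih =>
    intro x
    show PySem.List.combinations (x :: y :: t) (t.length + 1) = _
    rw [PySem.List.combinations_cons_succ]
    rw [ih y]
    rw [show t.length + 1 = (y :: t).length from rfl, PySem.List.combinations_length_self]
    rw [show (y :: t).length = t.length + 1 from rfl]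
    conv_rhs => rw [List.range_succ_eq_map]
    simp only [List.reverse_cons, List.map_append, List.map_reverse, List.map_map]
    rw [List.map_congr_left (l := List.range (t.length + 1))
      (f := (fun c => x :: c) ∘ (y :: t).eraseIdx)
      (g := (x :: y :: t).eraseIdx ∘ Nat.succ)
      (fun a _ => by simp [List.eraseIdx_cons_succ])]
    simp

theorem pvComb_pred {α : Type} (l : List α) (hl : l ≠ []) :
    PySem.List.combinations l (l.length - 1)
      = ((List.range l.length).reverse).map l.eraseIdx := by
  match l with
  | [] => exact absurd rfl hl
  | x :: xs =>
    rw [show (x :: xs).length - 1 = xs.length from by simp]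
    rw [show (x :: xs).length = xs.length + 1 from rfl]
    exact pvComb_cons xs x

theorem pvFlatMap_single {α : Type} (g : Nat → List α) : ∀ (N : Nat) (v : Nat), v < N →
    (∀ i, i < N → i ≠ v → g i = []) → (List.range N).flatMap g = g v := by
  intro N
  induction N with
  | zero => intro v hv; omega
  | succ N ih =>
    intro v hv h0
    rw [List.range_succ, List.flatMap_append]
    rcases Nat.lt_or_ge v N with hlt | hge
    · rw [ih v hlt (fun i hi hne => h0 i (by omega) hne)]
      simp [h0 N (by omega) (by omega)]
    · have hvN : v = N := by omega
      subst hvN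
      have : (List.range v).flatMap g = [] := by
        rw [List.flatMap_eq_nil_iff]
        intro x hx
        exact h0 x (by simp at hx; omega) (by simp at hx; omega)
      simp [this]

theorem pvNames_length (k : Nat) : (pvNames k).length = k := by
  simp [pvNames]

theorem pvAllCombs (m : Nat) (hm : 2 ≤ m) :
    actorAllCombinations (m : Int)
      = ((List.range m).reverse).map
          (fun j => PySem.Str.join ", " ((pvNames m).eraseIdx j)) := by
  unfold actorAllCombinations
  rw [pvCols m (by omega), pySplit_join (pvNames m)
    (by intro s hs; rcases List.mem_map.1 hs with ⟨i, _, rfl⟩; exact pvName_comma_free i)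
    (pvNames_ne_nil (by omega))]
  rw [show ((m : Int) + 1) = ((m : Nat) : Int) + 1 from rfl, pvRange_zero' m, List.foldl_map]
  have hstep : ∀ (acc : List String) (j : Nat),
      (PySem.List.combinations (pvNames m) ((j : Int)).toNat).foldl
        (fun acc element =>
          if ((element.length : Nat) : Int) = (m : Int) - 1 then
            acc ++ [PySem.Str.join ", " element]
          else acc) acc
      = acc ++ (if j = m - 1 then
          (PySem.List.combinations (pvNames m) (m - 1)).map (PySem.Str.join ", ") else []) := by
    intro acc j
    rw [Int.toNat_natCast]
    rw [PySem.List.foldl_append_ite (fun element => ((element.length : Nat) : Int) = (m : Int) - 1)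
      (PySem.Str.join ", ")]
    congr 1
    by_cases hj : j = m - 1
    · subst hj
      rw [if_pos rfl, List.filter_eq_self.2 (by
        intro e he
        have := PySem.List.length_of_mem_combinations he
        simp [this]
        omega)]
    · rw [if_neg hj, List.filter_eq_nil_iff.2 (by
        intro e he
        have := PySem.List.length_of_mem_combinations he
        simp [this]
        omega)]
      simp
  refine Eq.trans (PySem.List.foldl_congr_mem _ _
    (fun (acc : List String) (j : Nat) => acc ++ (if j = m - 1 then
      (PySem.List.combinations (pvNames m) (m - 1)).map (PySem.Str.join ", ") else [])) []
    (fun acc x _ => hstep acc x)) ?_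
  rw [PySem.List.foldl_append_eq_flatMap, List.nil_append]
  rw [pvFlatMap_single _ (m + 1) (m - 1) (by omega) (fun i _ hne => by simp [hne]), if_pos rfl]
  rw [show m - 1 = (pvNames m).length - 1 from by rw [pvNames_length]]
  rw [pvComb_pred (pvNames m) (pvNames_ne_nil (by omega))]
  rw [pvNames_length, List.map_map]
  rfl

def pvPair (m : Nat) (i : Nat) (a : String) : String :=
  "l" ++ PySem.Int.toStr ((m : Int) - 1) ++ "." ++ pvName i ++ " = " ++
    ("v" ++ PySem.Int.toStr (m : Int)) ++ "." ++ a

def pvCond (m : Nat) (j : Nat) : String :=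
  PySem.Str.join " AND "
    ((((pvNames m).eraseIdx j).zipIdx 0).map (fun ai => pvPair m ai.2 ai.1))

def pvClause (m : Nat) (j : Nat) : String :=
  "EXISTS (SELECT * FROM " ++ ("l" ++ PySem.Int.toStr ((m : Int) - 1)) ++ " WHERE " ++ pvCond m j

theorem pvNames_getElem (k i : Nat) (h : i < k) :
    (pvNames k)[i]'(by simp [pvNames]; omega) = pvName i := by
  simp [pvNames]

theorem pv_B (m : Nat) (_hm : 1 ≤ m) :
    existsStatement_alt (m : Int)
      = PySem.Str.join ") AND " (((List.range m).reverse).map (pvClause m)) := by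
  simp only [existsStatement_alt]
  rw [show ((m : Int) + 1) = ((m : Nat) : Int) + 1 from rfl, pvRange_one m, List.map_map]
  rw [List.map_congr_left (l := List.range m)
    (f := (fun i => "actor" ++ PySem.Int.toStr i) ∘ (fun i : Nat => ((i : Int) + 1)))
    (g := pvName) (fun a _ => rfl)]
  rw [pvRange_neg m, List.map_map]
  congr 1
  apply List.ext_getElem (by simp)
  intro i hi hi'
  simp only [List.getElem_map, Function.comp_def]
  rw [List.getElem_reverse]
  simp only [List.getElem_range, List.length_range]
  have hlen : i < m := by simpa using hi
  set t : Nat := m - 1 - i with ht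
  have hcast : (m : Int) - 1 - (i : Int) = ((t : Nat) : Int) := by omega
  rw [hcast]
  have htm : t < m := by omega
  rw [PySem.List.slice_to_natCast]
  rw [show ((t : Nat) : Int) + 1 = ((t + 1 : Nat) : Int) from by omega,
    PySem.List.slice_from_natCast]
  rw [← List.eraseIdx_eq_take_drop_succ]
  show "EXISTS (SELECT * FROM " ++ _ ++ " WHERE " ++ _ = pvClause m (m - 1 - i)
  unfold pvClause
  congr 1
  unfold pvCond
  congr 1
  apply List.ext_getElem (by
    simp only [List.length_map, List.length_zip, List.length_zipIdx, List.length_eraseIdx]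
    rw [pvNames_length]
    simp [htm]
    omega)
  intro p hp hp'
  simp only [List.getElem_map, List.getElem_zip, List.getElem_zipIdx]
  have hplen : p < m - 1 := by
    simp only [List.length_map, List.length_zip, List.length_eraseIdx] at hp
    simp [htm] at hp
    omega
  unfold pvPair
  simp only [← ht]
  simp [pvNames, List.getElem_range]

theorem pvFoldTemp (g : Int → String → String) : ∀ (parts : List String) (s0 : String) (k : Nat),
    parts.foldl (fun (st : String × Int) a => (st.1 ++ g st.2 a, st.2 + 1)) (s0, (k : Int))
      = (s0 ++ pvCat ((parts.zipIdx k).map (fun ai => g ((ai.2 : Int)) ai.1)),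
          (k : Int) + parts.length) := by
  intro parts
  induction parts with
  | nil => intro s0 k; simp [pvCat]
  | cons a t ih =>
    intro s0 k
    rw [List.foldl_cons]
    rw [show ((k : Int) + 1) = ((k + 1 : Nat) : Int) from by push_cast; ring]
    rw [ih]
    rw [List.zipIdx_cons, List.map_cons]
    rw [Prod.ext_iff]
    constructor
    · show (s0 ++ g (k : Int) a) ++ pvCat _ = s0 ++ pvCat (g ((k : Nat) : Int) a :: _)
      rw [pvCat, String.append_assoc]
    · show ((k : Nat) : Int) + 1 + (t.length : Int) = (k : Int) + ((a :: t).length : Int)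
      simp only [List.length_cons]
      push_cast
      omega

theorem pvFoldTemp0 (g : Int → String → String) (parts : List String) :
    parts.foldl (fun (st : String × Int) a => (st.1 ++ g st.2 a, st.2 + 1)) ("", 0)
      = ("" ++ pvCat ((parts.zipIdx 0).map (fun ai => g ((ai.2 : Int)) ai.1)),
          (0 : Int) + parts.length) := by
  have := pvFoldTemp g parts "" 0
  simpa using this

def pvClauseOf (m : Nat) (st : String) : String :=
  "EXISTS (SELECT * FROM " ++ ("l" ++ PySem.Int.toStr ((m : Int) - 1)) ++ " WHERE " ++ st

theorem pvClause_eq (m j : Nat) : pvClause m j = pvClauseOf m (pvCond m j) := rfl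

theorem pvAssemble (m : Nat) : ∀ (stmts : List String) (s0 : String),
    stmts.foldl (fun full st =>
      full ++ "EXISTS (SELECT * FROM " ++ ("l" ++ PySem.Int.toStr ((m : Int) - 1))
        ++ " WHERE " ++ st ++ ") AND ") s0
      = s0 ++ pvCat (stmts.map (fun st => pvClauseOf m st ++ ") AND ")) := by
  intro stmts
  induction stmts with
  | nil => intro s0; simp [pvCat]
  | cons a t ih =>
    intro s0
    rw [List.foldl_cons, ih]
    simp [pvCat, pvClauseOf, String.append_assoc]

theorem pvStatement_eq (m : Nat) (hm : 2 ≤ m) (j : Nat) (hj : j < m) :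
    PySem.Str.slice
      ((pySplit (PySem.Str.join ", " ((pvNames m).eraseIdx j)) ", ").foldl
        (fun (st : String × Int) actor =>
          (st.1 ++
            ("l" ++ PySem.Int.toStr ((m : Int) - 1) ++ "." ++
              PySem.List.pyGetD (pySplit (actorColumnsForLevel ((m : Int) - 1)) ", ") st.2 "" ++
              " = " ++ ("v" ++ PySem.Int.toStr (m : Int)) ++ "." ++ actor ++ " AND "),
            st.2 + 1)) ("", 0)).1
      none (some (-5))
    = pvCond m j := by
  have hprevCols : pySplit (actorColumnsForLevel ((m : Int) - 1)) ", " = pvNames (m - 1) := by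
    rw [show ((m : Int) - 1) = ((m - 1 : Nat) : Int) from by omega]
    rw [pvCols (m - 1) (by omega)]
    exact pySplit_join _ (by
        intro s hs
        rcases List.mem_map.1 hs with ⟨i, _, rfl⟩
        exact pvName_comma_free i)
      (pvNames_ne_nil (by omega))
  have hsplit : pySplit (PySem.Str.join ", " ((pvNames m).eraseIdx j)) ", "
      = (pvNames m).eraseIdx j := by
    apply pySplit_join
    · intro s hs
      have hmem : s ∈ pvNames m := List.eraseIdx_subset hs
      rcases List.mem_map.1 hmem with ⟨i, _, rfl⟩
      exact pvName_comma_free i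
    · intro hnil
      have := congrArg List.length hnil
      rw [List.length_eraseIdx, pvNames_length] at this
      simp [hj] at this
      omega
  rw [hsplit, hprevCols]
  rw [pvFoldTemp0 (fun i a =>
    "l" ++ PySem.Int.toStr ((m : Int) - 1) ++ "." ++
      PySem.List.pyGetD (pvNames (m - 1)) i "" ++
      " = " ++ ("v" ++ PySem.Int.toStr (m : Int)) ++ "." ++ a ++ " AND ")
    ((pvNames m).eraseIdx j)]
  show PySem.Str.slice ("" ++ _) none (some (-5)) = _
  rw [String.empty_append]
  have hidx : ∀ ai ∈ ((pvNames m).eraseIdx j).zipIdx 0, ai.2 < m - 1 := by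
    intro ai hai
    have := List.snd_lt_add_of_mem_zipIdx hai
    rw [List.length_eraseIdx, pvNames_length] at this
    simp [hj] at this
    omega
  rw [List.map_congr_left (fun ai hai => by
    rw [PySem.List.pyGetD_natCast, List.getD_eq_getElem _ _
      (by rw [pvNames_length]; exact hidx ai hai)]
    rw [pvNames_getElem (m - 1) ai.2 (hidx ai hai)])]
  rw [show (fun ai : String × Nat =>
        "l" ++ PySem.Int.toStr ((m : Int) - 1) ++ "." ++ pvName ai.2 ++ " = " ++
          ("v" ++ PySem.Int.toStr (m : Int)) ++ "." ++ ai.1 ++ " AND ")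
      = (fun b => b ++ " AND ") ∘ (fun ai : String × Nat => pvPair m ai.2 ai.1) from rfl]
  rw [← List.map_map]
  rw [show ((-5 : Int)) = -((5 : Nat) : Int) from by norm_num]
  rw [pvStrip " AND " 5 (by omega) (by decide) _ (by
    intro hnil
    rw [List.map_eq_nil_iff] at hnil
    have := congrArg List.length hnil
    rw [List.length_zipIdx, List.length_eraseIdx, pvNames_length] at this
    simp [hj] at this
    omega)]
  rfl

theorem pv_A (m : Nat) (hm : 2 ≤ m) :
    existsStatement (m : Int)
      = PySem.Str.join ") AND " (((List.range m).reverse).map (pvClause m)) := by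
  simp only [existsStatement]
  rw [pvAllCombs m hm]
  rw [PySem.List.foldl_append_singleton_eq_map, List.nil_append, List.map_map]
  rw [pvAssemble m]
  rw [String.empty_append]
  rw [show (fun st => pvClauseOf m st ++ ") AND ")
      = ((fun b => b ++ ") AND ") ∘ pvClauseOf m) from rfl]
  rw [← List.map_map]
  rw [show ((-6 : Int)) = -((6 : Nat) : Int) from by norm_num]
  rw [pvStrip ") AND " 6 (by omega) (by decide) _ (by
    intro hnil
    rw [List.map_eq_nil_iff, List.map_eq_nil_iff] at hnil
    have := congrArg List.length hnil
    simp at this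
    omega)]
  congr 1
  rw [List.map_map]
  apply List.map_congr_left
  intro j hj
  have hjm : j < m := by
    rw [List.mem_reverse, List.mem_range] at hj
    exact hj
  rw [pvClause_eq]
  exact congrArg (pvClauseOf m) (pvStatement_eq m hm j hjm)

theorem pv_main : ∀ (n : Int), n ≠ 1 → existsStatement n = existsStatement_alt n := by
  intro n hn
  rcases lt_trichotomy n 0 with hneg | hz | hpos
  · simp only [existsStatement, actorAllCombinations, existsStatement_alt]
    rw [pvRange_one_nil (show n + 1 ≤ 0 by omega),
      pvRange_negstep_nil (show n - 1 ≤ -1 by omega)]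
    simp only [List.foldl_nil, List.map_nil]
    decide
  · subst hz
    decide
  · have h2 : 2 ≤ n := by omega
    obtain ⟨m, rfl⟩ : ∃ m : Nat, n = (m : Int) := ⟨n.toNat, (Int.toNat_of_nonneg (by omega)).symm⟩
    have hm : 2 ≤ m := by exact_mod_cast h2
    rw [pv_A m hm, pv_B m (by omega)]

-- ===== VERDICT (by name: the statement is the Claim_ definition above) =====
theorem existsStatement_spec : Claim_unchanged_existsStatement := by
  intro n _ hD
  exact pv_main n hD

theorem existsStatement_changed : Claim_changed_existsStatement := by
  unfold Claim_changed_existsStatement; decide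

theorem existsStatement_tight : Claim_exact_existsStatement := by
  unfold Claim_exact_existsStatement
  intro n _ hD
  subst hD
  decide
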